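-- pv_equiv track=rewrite | github.com/einstalek/invoice_ai | config/header.py | _get_initials
-- ===== SOURCE A (Python) =====
-- def _get_initials(given_name: str, family_name: str, full_name: str, email: str) -> str:
--     if given_name and family_name:
--         return (given_name[0] + family_name[0]).upper()
--     if full_name:
--         parts = [p for p in full_name.strip().split() if p]
--         if len(parts) >= 2:
--             return (parts[0][0] + parts[1][0]).upper()
--         if len(parts) == 1:
--             return parts[0][:2].upper()
--     if email:
--         handle = email.split("@", 1)[0]
--         parts = [p for p in handle.replace("-", " ").replace("_", " ").replace(".", " ").split() if p]
--         if len(parts) >= 2: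
--             return (parts[0][0] + parts[1][0]).upper()
--         if len(parts) == 1:
--             return parts[0][:2].upper()
--     return ""
-- ===== SOURCE B (Python) =====
-- def _get_initials(given_name: str, family_name: str, full_name: str, email: str) -> str:
--     if given_name and family_name:
--         return (given_name[0] + family_name[0]).upper()
--     # One character-level scan per source: no splitting, no token lists.
--     # Track first word's first two chars and the second word's first char; stop early.
--     for text, extra in ((full_name, ""), (email.split("@", 1)[0], "-_.")):
--         c1 = c2 = d1 = None
--         between = False  # a separator has been seen after the first word started
--         for ch in text:
--             if ch.isspace() or ch in extra:
--                 between = between or c1 is not None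
--                 continue
--             if c1 is None:
--                 c1 = ch
--             elif between:
--                 d1 = ch
--                 break
--             elif c2 is None:
--                 c2 = ch
--         if d1 is not None:
--             return (c1 + d1).upper()
--         if c1 is not None:
--             return (c1 + (c2 or "")).upper()
--     return ""
-- ===== Notes on version B (the rewrite author's own statement) =====
-- stated objective: alternative
-- what changed: Replaces A's strip/replace/split/filter token-list pipelines by a single character-level state-machine scan per source that records the first word's first two characters and the second word's first character and stops as soon as the second word starts; no intermediate strings or token lists are built.
import Mathlib
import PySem

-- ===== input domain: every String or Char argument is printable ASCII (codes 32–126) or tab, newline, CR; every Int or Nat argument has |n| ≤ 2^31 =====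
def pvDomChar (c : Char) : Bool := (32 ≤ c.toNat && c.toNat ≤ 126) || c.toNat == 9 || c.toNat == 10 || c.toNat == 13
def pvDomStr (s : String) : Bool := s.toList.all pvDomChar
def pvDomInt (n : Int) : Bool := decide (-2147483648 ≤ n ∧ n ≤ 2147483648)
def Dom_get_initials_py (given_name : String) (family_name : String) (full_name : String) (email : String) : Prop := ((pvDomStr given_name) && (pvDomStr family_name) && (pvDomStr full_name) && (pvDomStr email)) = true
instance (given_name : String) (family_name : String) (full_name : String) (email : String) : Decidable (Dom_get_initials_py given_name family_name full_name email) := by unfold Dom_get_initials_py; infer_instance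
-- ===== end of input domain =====

-- B replaces A's strip/replace/split/filter token-list pipelines by one character-level
-- state-machine scan per source (first two chars of word 1, first char of word 2, early
-- exit); a different algorithm of the same cost.

-- ===== PORT A =====
def get_initials_py (given_name : String) (family_name : String) (full_name : String) (email : String) : String :=
  if given_name ≠ "" ∧ family_name ≠ "" then
    -- (given_name[0] + family_name[0]).upper()
    String.ofList (PySem.Chars.upper [given_name.toList.headD ' ', family_name.toList.headD ' '])
  else
    -- the 'if full_name:' block may fall through; model its early returns as an Option
    let fuRes : Option (List Char) :=
      if full_name ≠ "" then
        let parts := (PySem.Chars.split₀ (PySem.Chars.strip full_name.toList)).filter (fun p => p ≠ [])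
        if parts.length ≥ 2 then
          some (PySem.Chars.upper [(parts.getD 0 []).headD ' ', (parts.getD 1 []).headD ' '])
        else if parts.length = 1 then
          some (PySem.Chars.upper ((parts.getD 0 []).take 2))
        else none
      else none
    match fuRes with
    | some r => String.ofList r
    | none =>
      if email ≠ "" then
        let handle := ((PySem.Chars.splitMax? email.toList ['@'] 1).getD []).getD 0 []
        let parts := (PySem.Chars.split₀ (PySem.Chars.replace (PySem.Chars.replace (PySem.Chars.replace handle ['-'] [' ']) ['_'] [' ']) ['.'] [' '])).filter (fun p => p ≠ [])
        if parts.length ≥ 2 then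
          String.ofList (PySem.Chars.upper [(parts.getD 0 []).headD ' ', (parts.getD 1 []).headD ' '])
        else if parts.length = 1 then
          String.ofList (PySem.Chars.upper ((parts.getD 0 []).take 2))
        else ""
      else ""

-- ===== PORT B =====
-- the inner 'for ch in text' loop: state (c1, c2, between); returns (c1, c2, d1),
-- breaking (returning) as soon as the first char of the second word is seen
def pvCharLoop (extra : List Char) : List Char → Option Char → Option Char → Bool → Option Char × Option Char × Option Char
  | [], c1, c2, _ => (c1, c2, none)
  | ch :: rest, c1, c2, between =>
    if PySem.Chars.isspace ch || extra.contains ch then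
      pvCharLoop extra rest c1 c2 (between || c1.isSome)
    else
      match c1 with
      | none => pvCharLoop extra rest (some ch) c2 between
      | some _ =>
        if between then (c1, c2, some ch)          -- d1 = ch; break
        else if c2.isNone then pvCharLoop extra rest c1 (some ch) between
        else pvCharLoop extra rest c1 c2 between

-- the two trailing 'if's of the loop body ((c1+d1).upper() / (c1+(c2 or "")).upper())
def pvOutOf : Option Char × Option Char × Option Char → Option (List Char)
  | (some c1, _, some d1) => some (PySem.Chars.upper [c1, d1])
  | (none, _, some _) => none   -- unreachable: pvCharLoop sets d1 only after c1 is set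
  | (some c1, c2, none) => some (PySem.Chars.upper (c1 :: c2.toList))
  | (none, _, none) => none

def pvSourceOut (text extra : List Char) : Option (List Char) :=
  pvOutOf (pvCharLoop extra text none none false)

-- the 'for text, extra in (…)' loop: first source that produces initials, else ""
def pvLoop : List (List Char × List Char) → List Char
  | [] => []
  | (t, e) :: rest => match pvSourceOut t e with | some r => r | none => pvLoop rest

def get_initials_py_alt (given_name : String) (family_name : String) (full_name : String) (email : String) : String :=
  if given_name ≠ "" ∧ family_name ≠ "" then
    String.ofList (PySem.Chars.upper [given_name.toList.headD ' ', family_name.toList.headD ' '])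
  else
    let handle := ((PySem.Chars.splitMax? email.toList ['@'] 1).getD []).getD 0 []
    String.ofList (pvLoop [(full_name.toList, []), (handle, ['-', '_', '.'])])

-- ===== PRECONDITION & SPEC =====
def Spec_get_initials_py (given_name : String) (family_name : String) (full_name : String) (email : String) (out : String) : Prop := out = get_initials_py_alt given_name family_name full_name email
instance (given_name : String) (family_name : String) (full_name : String) (email : String) (out : String) : Decidable (Spec_get_initials_py given_name family_name full_name email out) := by unfold Spec_get_initials_py; infer_instance

-- ===== CLAIM (what is proved, stated in full; the proofs are below) =====
def Claim_equal_get_initials_py : Prop := ∀ (given_name : String) (family_name : String) (full_name : String) (email : String), Dom_get_initials_py given_name family_name full_name email → Spec_get_initials_py given_name family_name full_name email (get_initials_py given_name family_name full_name email)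

-- ===== LEMMAS AND PROOFS =====

-- simple recursive splitter: words of l (reading a partial reversed word cur), by predicate q
def pvTokC (q : Char → Bool) : List Char → List Char → List (List Char)
  | cur, [] => if cur.isEmpty then [] else [cur.reverse]
  | cur, c :: rest => if q c then (if cur.isEmpty then pvTokC q [] rest else cur.reverse :: pvTokC q [] rest) else pvTokC q (c :: cur) rest

-- classification of a token list as A's length-based branches read it
def pvClOut : List (List Char) → Option (List Char)
  | [] => none
  | [t] => some (PySem.Chars.upper (t.take 2))
  | t :: u :: _ => some (PySem.Chars.upper [t.headD ' ', u.headD ' '])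

theorem pv_go_spec (l cur acc) : PySem.Chars.split₀.go l cur acc = acc.reverse ++ pvTokC PySem.Chars.isspace cur l := by
  induction l generalizing cur acc with
  | nil => by_cases h : cur.isEmpty <;> simp [PySem.Chars.split₀.go, pvTokC, h]
  | cons c rest ih =>
    by_cases hq : PySem.Chars.isspace c
    · by_cases hc : cur.isEmpty <;> simp [PySem.Chars.split₀.go, pvTokC, hq, hc, ih]
    · simp [PySem.Chars.split₀.go, pvTokC, hq, ih]

theorem pv_split₀_eq (s : List Char) : PySem.Chars.split₀ s = pvTokC PySem.Chars.isspace [] s := by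
  have := pv_go_spec s [] []
  simpa [PySem.Chars.split₀] using this

theorem pv_tok_ne (q : Char → Bool) (l cur : List Char) : ∀ t ∈ pvTokC q cur l, t ≠ [] := by
  induction l generalizing cur with
  | nil =>
    by_cases h : cur.isEmpty
    · simp [pvTokC, h]
    · intro t ht
      simp [pvTokC, h] at ht
      subst ht
      simp [List.isEmpty_iff] at h
      simpa using h
  | cons c rest ih =>
    intro t ht
    by_cases hq : q c
    · by_cases hc : cur.isEmpty
      · simp [pvTokC, hq, hc] at ht
        exact ih [] t ht
      · simp [pvTokC, hq, hc] at ht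
        rcases ht with h1 | h2
        · subst h1
          simp [List.isEmpty_iff] at hc
          simpa using hc
        · exact ih [] t h2
    · simp [pvTokC, hq] at ht
      exact ih (c :: cur) t ht

theorem pv_tok_filter (q : Char → Bool) (l : List Char) : (pvTokC q [] l).filter (fun p => p ≠ []) = pvTokC q [] l := by
  apply List.filter_eq_self.mpr
  intro t ht
  simpa using pv_tok_ne q l [] t ht

theorem pv_tok_head (q : Char → Bool) (l : List Char) : ∀ cur : List Char, cur ≠ [] → ∃ u L, pvTokC q cur l = (cur.reverse ++ u) :: L := by
  induction l with
  | nil =>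
    intro cur h
    refine ⟨[], [], ?_⟩
    simp [pvTokC, List.isEmpty_iff, h]
  | cons c rest ih =>
    intro cur h
    by_cases hq : q c
    · refine ⟨[], pvTokC q [] rest, ?_⟩
      simp [pvTokC, hq, List.isEmpty_iff, h]
    · obtain ⟨u, L, hu⟩ := ih (c :: cur) (by simp)
      refine ⟨c :: u, L, ?_⟩
      simpa [pvTokC, hq] using hu

theorem pv_congr_q (q q' : Char → Bool) (h : ∀ c, q c = q' c) (l : List Char) : ∀ cur, pvTokC q cur l = pvTokC q' cur l := by
  induction l with
  | nil => intro cur; rfl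
  | cons c rest ih => intro cur; simp [pvTokC, h c, ih]

theorem pv_take2 (t : List Char) (h : t ≠ []) : t.take 2 = t.headD ' ' :: (t.tail.head?).toList := by
  match t with
  | a :: t' => cases t' <;> simp

-- main correspondence: token classification = state machine, state 'between first and second word'
theorem pv_main2 (extra : List Char) (l : List Char) : ∀ (t : List Char), t ≠ [] →
    pvClOut (t :: pvTokC (fun c => PySem.Chars.isspace c || extra.contains c) [] l)
      = pvOutOf (pvCharLoop extra l (some (t.headD ' ')) t.tail.head? true) := by
  induction l with
  | nil =>
    intro t ht
    simp [pvTokC, pvCharLoop, pvClOut, pvOutOf, pv_take2 t ht]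
  | cons c rest ih =>
    intro t ht
    cases hq : (PySem.Chars.isspace c || extra.contains c) with
    | true =>
      simp only [pvTokC, pvCharLoop, hq, reduceIte, List.isEmpty_nil, Bool.true_or]
      exact ih t ht
    | false =>
      obtain ⟨u, L, hu⟩ := pv_tok_head (fun c => PySem.Chars.isspace c || extra.contains c) rest [c] (by simp)
      simp only [pvTokC, pvCharLoop, hq, reduceIte, Bool.false_eq_true, hu]
      simp [pvClOut, pvOutOf]

-- state 'inside the first word', partial reversed word cur
theorem pv_main1 (extra : List Char) (l : List Char) : ∀ (cur : List Char), cur ≠ [] →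
    pvClOut (pvTokC (fun c => PySem.Chars.isspace c || extra.contains c) cur l)
      = pvOutOf (pvCharLoop extra l (some (cur.reverse.headD ' ')) cur.reverse.tail.head? false) := by
  induction l with
  | nil =>
    intro cur h
    have hrev : cur.reverse ≠ [] := by simpa using h
    simp [pvTokC, List.isEmpty_iff, h, pvCharLoop, pvClOut, pvOutOf, pv_take2 cur.reverse hrev]
  | cons c rest ih =>
    intro cur h
    have hrev : cur.reverse ≠ [] := by simpa using h
    have hE : cur.isEmpty = false := by simpa [List.isEmpty_iff] using h
    cases hq : (PySem.Chars.isspace c || extra.contains c) with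
    | true =>
      simp only [pvTokC, pvCharLoop, hq, reduceIte, hE, Bool.false_eq_true, Option.isSome_some,
        Bool.or_true]
      exact pv_main2 extra rest cur.reverse hrev
    | false =>
      obtain ⟨y, ys, hy⟩ := List.exists_cons_of_ne_nil hrev
      have h3 := ih (c :: cur) (by simp)
      have hrc : (c :: cur).reverse = cur.reverse ++ [c] := by simp
      rw [hrc, hy] at h3
      rw [hy]
      simp only [pvTokC, pvCharLoop, hq, reduceIte, Bool.false_eq_true, List.cons_append,
        List.headD_cons, List.tail_cons] at h3 ⊢
      cases ys with
      | nil => simpa using h3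
      | cons z zs => simpa using h3

theorem pv_main0 (extra : List Char) (l : List Char) :
    pvClOut (pvTokC (fun c => PySem.Chars.isspace c || extra.contains c) [] l) = pvSourceOut l extra := by
  induction l with
  | nil => rfl
  | cons c rest ih =>
    cases hq : (PySem.Chars.isspace c || extra.contains c) with
    | true =>
      simp only [pvSourceOut] at ih ⊢
      simp only [pvTokC, pvCharLoop, hq, reduceIte, List.isEmpty_nil, Option.isSome_none,
        Bool.or_false]
      exact ih
    | false =>
      have h1 := pv_main1 extra rest [c] (by simp)
      simp only [pvSourceOut]
      simp only [pvTokC, pvCharLoop, hq, reduceIte, Bool.false_eq_true, List.isEmpty_nil]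
      simpa using h1

-- trailing separators do not change the scan's result
theorem pv_scan_append (extra t w : List Char) (hw : ∀ c ∈ w, PySem.Chars.isspace c = true) :
    ∀ c1 c2 b, pvCharLoop extra (t ++ w) c1 c2 b = pvCharLoop extra t c1 c2 b := by
  induction t with
  | nil =>
    intro c1 c2 b
    induction w generalizing b with
    | nil => rfl
    | cons c w' ihw =>
      have hc : (PySem.Chars.isspace c || extra.contains c) = true := by
        simp [hw c (by simp)]
      simp only [List.nil_append, pvCharLoop, hc, reduceIte] at ihw ⊢
      exact ihw (by intro x hx; exact hw x (by simp [hx])) _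
  | cons c t' ih =>
    intro c1 c2 b
    cases hq : (PySem.Chars.isspace c || extra.contains c) with
    | true => simp only [List.cons_append, pvCharLoop, hq, reduceIte]; exact ih c1 c2 _
    | false =>
      cases c1 with
      | none => simp only [List.cons_append, pvCharLoop, hq, reduceIte, Bool.false_eq_true]; exact ih _ c2 b
      | some a =>
        cases b with
        | true => simp only [List.cons_append, pvCharLoop, hq, reduceIte, Bool.false_eq_true]
        | false =>
          cases hc2 : c2.isNone <;>
            simp only [List.cons_append, pvCharLoop, hq, hc2, reduceIte, Bool.false_eq_true] <;>
            exact ih _ _ _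

theorem pv_scan_lstrip (extra s : List Char) (c2 : Option Char) :
    pvCharLoop extra (List.dropWhile PySem.Chars.isspace s) none c2 false = pvCharLoop extra s none c2 false := by
  induction s with
  | nil => rfl
  | cons c rest ih =>
    cases hsp : PySem.Chars.isspace c with
    | true =>
      simp only [List.dropWhile_cons, hsp, reduceIte, pvCharLoop, Option.isSome_none]
      exact ih
    | false => simp only [List.dropWhile_cons, hsp, Bool.false_eq_true, reduceIte]

theorem pv_scan_strip (extra s : List Char) :
    pvCharLoop extra (PySem.Chars.strip s) none none false = pvCharLoop extra s none none false := by
  have key : ∀ t : List Char, pvCharLoop extra (PySem.Chars.rstrip t) none none false = pvCharLoop extra t none none false := by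
    intro t
    have hsplit : List.takeWhile PySem.Chars.isspace t.reverse ++ List.dropWhile PySem.Chars.isspace t.reverse = t.reverse :=
      List.takeWhile_append_dropWhile
    have hdec : t = PySem.Chars.rstrip t ++ (List.takeWhile PySem.Chars.isspace t.reverse).reverse := by
      have h2 := congrArg List.reverse hsplit
      rw [List.reverse_append, List.reverse_reverse] at h2
      exact h2.symm
    have hw : ∀ c ∈ (List.takeWhile PySem.Chars.isspace t.reverse).reverse, PySem.Chars.isspace c = true :=
      fun c hc => List.mem_takeWhile_imp (List.mem_reverse.mp hc)
    conv_rhs => rw [hdec]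
    exact (pv_scan_append extra _ _ hw none none false).symm
  have hsr : PySem.Chars.strip s = PySem.Chars.rstrip (PySem.Chars.lstrip s) := rfl
  rw [hsr, key (PySem.Chars.lstrip s)]
  exact pv_scan_lstrip extra s none

-- replacing a single character is a map
theorem pv_replace_map (a b : Char) (s : List Char) :
    PySem.Chars.replace s [a] [b] = s.map (fun c => if c = a then b else c) := by
  have go : ∀ (l : List Char) (acc : List Char),
      PySem.Chars.replace.go [a] [b] l.length l acc = acc.reverse ++ l.map (fun c => if c = a then b else c) := by
    intro l
    induction l with
    | nil => intro acc; simp [PySem.Chars.replace.go]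
    | cons c t ih =>
      intro acc
      show PySem.Chars.replace.go [a] [b] (t.length + 1) (c :: t) acc = _
      by_cases h : a = c
      · have hp : [a].isPrefixOf (c :: t) = true := by simp [List.isPrefixOf, h]
        simp only [PySem.Chars.replace.go, hp, reduceIte, List.drop_succ_cons, List.drop_zero,
          List.length_cons, List.length_nil]
        rw [ih]
        simp [h.symm]
      · have hp : [a].isPrefixOf (c :: t) = false := by simp [List.isPrefixOf, h]
        simp only [PySem.Chars.replace.go, hp, Bool.false_eq_true, reduceIte]
        rw [ih]
        simp [Ne.symm h]
  have : ([a] : List Char).isEmpty = false := rfl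
  simp only [PySem.Chars.replace, this, Bool.false_eq_true, reduceIte]
  exact go s []

def pvF (c : Char) : Char := if c = '-' then ' ' else if c = '_' then ' ' else if c = '.' then ' ' else c

theorem pv_chain_map (s : List Char) :
    PySem.Chars.replace (PySem.Chars.replace (PySem.Chars.replace s ['-'] [' ']) ['_'] [' ']) ['.'] [' '] = s.map pvF := by
  rw [pv_replace_map, pv_replace_map, pv_replace_map, List.map_map, List.map_map]
  apply List.map_congr_left
  intro c _
  simp only [Function.comp]
  by_cases h1 : c = '-' <;> by_cases h2 : c = '_' <;> by_cases h3 : c = '.' <;>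
    simp [pvF, h1, h2, h3]

-- separators replaced by spaces: tokenizing the mapped string = tokenizing with the larger separator set
theorem pv_tok_map (l : List Char) : ∀ cur,
    pvTokC PySem.Chars.isspace cur (l.map pvF)
      = pvTokC (fun c => PySem.Chars.isspace c || (['-', '_', '.'] : List Char).contains c) cur l := by
  have h1 : ∀ c : Char, PySem.Chars.isspace (pvF c)
      = (PySem.Chars.isspace c || (['-', '_', '.'] : List Char).contains c) := by
    intro c
    by_cases ha : c = '-'
    · subst ha; decide
    · by_cases hb : c = '_'
      · subst hb; decide
      · by_cases hc : c = '.'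
        · subst hc; decide
        · simp [pvF, ha, hb, hc]
  have h2 : ∀ c : Char, (PySem.Chars.isspace c || (['-', '_', '.'] : List Char).contains c) = false → pvF c = c := by
    intro c hc
    simp at hc
    simp [pvF, hc.2.1, hc.2.2.1, hc.2.2.2]
  induction l with
  | nil => intro cur; rfl
  | cons c rest ih =>
    intro cur
    cases hq : (PySem.Chars.isspace c || (['-', '_', '.'] : List Char).contains c) with
    | true =>
      have hf : PySem.Chars.isspace (pvF c) = true := by rw [h1 c, hq]
      by_cases hcur : cur.isEmpty <;>
        simp only [List.map_cons, pvTokC, hq, hf, hcur, reduceIte, ih]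
    | false =>
      have hf : PySem.Chars.isspace (pvF c) = false := by rw [h1 c, hq]
      have hs : PySem.Chars.isspace c = false := (Bool.or_eq_false_iff.mp hq).1
      have hcont : (['-', '_', '.'] : List Char).contains c = false := (Bool.or_eq_false_iff.mp hq).2
      simp only [List.map_cons, pvTokC, hs, hcont, Bool.false_or, Bool.false_eq_true,
        reduceIte, h2 c hq, ih]

-- A's length-based branches compute exactly pvClOut
theorem pv_LA (P : List (List Char)) :
    (if P.length ≥ 2 then some (PySem.Chars.upper [(P.getD 0 []).headD ' ', (P.getD 1 []).headD ' '])
     else if P.length = 1 then some (PySem.Chars.upper ((P.getD 0 []).take 2))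
     else none) = pvClOut P := by
  match P with
  | [] => rfl
  | [t] => rfl
  | t :: u :: rest => simp [pvClOut, List.length]

theorem pv_LA' (P : List (List Char)) :
    (if P.length ≥ 2 then String.ofList (PySem.Chars.upper [(P.getD 0 []).headD ' ', (P.getD 1 []).headD ' '])
     else if P.length = 1 then String.ofList (PySem.Chars.upper ((P.getD 0 []).take 2))
     else "") = (match pvClOut P with | some r => String.ofList r | none => "") := by
  match P with
  | [] => rfl
  | [t] => rfl
  | t :: u :: rest => simp [pvClOut, List.length]

-- ===== VERDICT (by name: the statement is the Claim_ definition above) =====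
theorem get_initials_py_spec : Claim_equal_get_initials_py := by
  intro gn fn fu em _
  unfold Spec_get_initials_py get_initials_py get_initials_py_alt
  have qnil : ∀ c : Char, PySem.Chars.isspace c = (PySem.Chars.isspace c || ([] : List Char).contains c) := by
    intro c; simp
  by_cases hgf : gn ≠ "" ∧ fn ≠ ""
  · rw [if_pos hgf, if_pos hgf]
  · rw [if_neg hgf, if_neg hgf]
    simp only [pvLoop]
    by_cases hfu : fu ≠ ""
    · rw [if_pos hfu]
      rw [pv_LA, pv_split₀_eq, pv_tok_filter, pv_congr_q PySem.Chars.isspace _ qnil _ [],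
        pv_main0 []]
      simp only [pvSourceOut, pv_scan_strip]
      cases hres : pvSourceOut fu.toList [] with
      | some r => simp only [pvSourceOut] at hres; rw [hres]
      | none =>
        simp only [pvSourceOut] at hres
        rw [hres]
        by_cases hem : em ≠ ""
        · rw [if_pos hem]
          rw [pv_LA', pv_chain_map, pv_split₀_eq, pv_tok_map, pv_tok_filter, pv_main0]
          simp only [pvSourceOut]
          cases pvOutOf (pvCharLoop ['-', '_', '.'] (((PySem.Chars.splitMax? em.toList ['@'] 1).getD []).getD 0 []) none none false) with
          | some r => rfl
          | none => rfl
        · rw [if_neg hem]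
          have hem' : em = "" := not_not.mp hem
          subst hem'
          decide
    · rw [if_neg hfu]
      have hfu' : fu = "" := not_not.mp hfu
      subst hfu'
      have hnone : pvSourceOut ("".toList) [] = none := by decide
      rw [hnone]
      by_cases hem : em ≠ ""
      · rw [if_pos hem]
        rw [pv_LA', pv_chain_map, pv_split₀_eq, pv_tok_map, pv_tok_filter, pv_main0]
        simp only [pvSourceOut]
        cases pvOutOf (pvCharLoop ['-', '_', '.'] (((PySem.Chars.splitMax? em.toList ['@'] 1).getD []).getD 0 []) none none false) with
        | some r => rfl
        | none => rfl
      · rw [if_neg hem]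
        have hem' : em = "" := not_not.mp hem
        subst hem'
        decide
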